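-- pv_equiv track=rewrite | github.com/SanthoshKannanSP/advent-of-code-2024 | day20/B.py | findCheatCount
-- ===== SOURCE A (Python) =====
-- def findCheatCount(posX,posY,minTime,dp,M,N):
--     count = 0
--     for x in range(posX-20,posX+21):
--         for y in range(posY-20+abs(posX-x),posY+21-abs(posX-x)):
--             if 0<=x<M and 0<=y<N and (x,y) in dp:
--                 currTime = dp[(x,y)]+abs(posX-x)+abs(posY-y)+(minTime-dp[(posX,posY)])
--                 if minTime-currTime>=100:
--                     count+=1
--     return count
-- ===== SOURCE B (Python) =====
-- def findCheatCount(posX, posY, minTime, dp, M, N):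
--     # minTime cancels algebraically: minTime - currTime == dp[(posX,posY)] - val - dist
--     return len([1 for (x, y), val in dp.items()
--                 if abs(posX - x) + abs(posY - y) <= 20
--                 and 0 <= x < M and 0 <= y < N
--                 and dp[(posX, posY)] - val - (abs(posX - x) + abs(posY - y)) >= 100])
-- ===== Notes on version B (the rewrite author's own statement) =====
-- stated objective: simpler
-- what changed: B replaces the two nested range loops over the fixed 41x41 diamond (841 membership lookups) with a single filtered comprehension over dp.items() keyed on Manhattan distance, and algebraically cancels minTime out of the saving test (saving = dp[(posX,posY)] - val - dist), returning the length of the filtered list instead of maintaining a counter.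
-- outside the precondition, e.g. on findCheatCount(0, 0, 150, {(1, 1): 30}, 10, 10): A raises KeyError, B raises KeyError
import Mathlib
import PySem

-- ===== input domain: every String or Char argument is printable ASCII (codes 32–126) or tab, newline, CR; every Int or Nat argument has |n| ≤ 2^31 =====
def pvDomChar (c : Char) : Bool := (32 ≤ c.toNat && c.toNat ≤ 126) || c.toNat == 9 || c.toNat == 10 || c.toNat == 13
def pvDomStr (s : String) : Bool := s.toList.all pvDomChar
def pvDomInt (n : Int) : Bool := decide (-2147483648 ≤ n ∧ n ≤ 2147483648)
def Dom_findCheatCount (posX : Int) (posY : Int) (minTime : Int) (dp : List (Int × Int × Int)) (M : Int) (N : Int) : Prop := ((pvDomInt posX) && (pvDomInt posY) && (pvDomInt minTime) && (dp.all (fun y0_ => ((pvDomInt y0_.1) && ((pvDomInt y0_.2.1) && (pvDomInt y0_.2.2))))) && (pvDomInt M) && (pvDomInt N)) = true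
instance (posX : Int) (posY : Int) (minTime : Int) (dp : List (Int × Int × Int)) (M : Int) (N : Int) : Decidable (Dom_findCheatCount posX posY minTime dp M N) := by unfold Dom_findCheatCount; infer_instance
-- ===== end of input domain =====

-- B is the length of one filtered comprehension over dp's items keyed on Manhattan distance,
-- with minTime cancelled out of the saving test, instead of A's two nested range loops over the
-- fixed 41x41 diamond with a membership lookup at every coordinate (objective: simpler).
-- dp arrives as the items of a Python dict; both ports build the same PySem.Dict from it.
def pvAsDict (dp : List (Int × Int × Int)) : PySem.Dict (Int × Int) Int :=
  PySem.Dict.ofList (dp.map (fun e => ((e.1, e.2.1), e.2.2)))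

-- ===== PORT A =====
def findCheatCount (posX : Int) (posY : Int) (minTime : Int) (dp : List (Int × Int × Int)) (M : Int) (N : Int) : Int :=
  let d := pvAsDict dp
  (PySem.List.pyRange (posX - 20) (posX + 21) 1).foldl (fun count x =>
    (PySem.List.pyRange (posY - 20 + |posX - x|) (posY + 21 - |posX - x|) 1).foldl (fun count y =>
      if 0 ≤ x ∧ x < M ∧ 0 ≤ y ∧ y < N ∧ d.contains (x, y) then
        -- dp[(x,y)] always present here; dp[(posX,posY)] can KeyError in Python: Pre_ excludes that
        let currTime := d.getD (x, y) 0 + |posX - x| + |posY - y| + (minTime - d.getD (posX, posY) 0)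
        if minTime - currTime ≥ 100 then count + 1 else count
      else count) count) 0

-- ===== PORT B =====
def findCheatCount_alt (posX : Int) (posY : Int) (minTime : Int) (dp : List (Int × Int × Int)) (M : Int) (N : Int) : Int :=
  let d := pvAsDict dp
  ((d.items.filter (fun e =>
      decide (|posX - e.1.1| + |posY - e.1.2| ≤ 20 ∧ 0 ≤ e.1.1 ∧ e.1.1 < M ∧
        0 ≤ e.1.2 ∧ e.1.2 < N ∧
        d.getD (posX, posY) 0 - e.2 - (|posX - e.1.1| + |posY - e.1.2|) ≥ 100))).length : Int)

-- ===== PRECONDITION & SPEC =====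
-- Pre_ excludes exactly the inputs on which Python A raises KeyError on dp[(posX,posY)]:
-- some dict key lies in the 41x41 diamond and inside the M x N bounds, but (posX,posY) is not a key.
-- (Python B raises on exactly the same inputs.)
def Pre_findCheatCount (posX : Int) (posY : Int) (minTime : Int) (dp : List (Int × Int × Int)) (M : Int) (N : Int) : Prop :=
  (posX, posY) ∈ dp.map (fun e => (e.1, e.2.1)) ∨
    ∀ e ∈ dp, ¬(|posX - e.1| + |posY - e.2.1| ≤ 20 ∧ 0 ≤ e.1 ∧ e.1 < M ∧ 0 ≤ e.2.1 ∧ e.2.1 < N)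
instance (posX : Int) (posY : Int) (minTime : Int) (dp : List (Int × Int × Int)) (M : Int) (N : Int) : Decidable (Pre_findCheatCount posX posY minTime dp M N) := by unfold Pre_findCheatCount; infer_instance

def pvWitness_findCheatCount : Int × Int × Int × (List (Int × Int × Int)) × Int × Int :=
  (0, 0, 150, [(0, 0, 0), (1, 1, 30)], 10, 10)

def Spec_findCheatCount (posX : Int) (posY : Int) (minTime : Int) (dp : List (Int × Int × Int)) (M : Int) (N : Int) (out : Int) : Prop := out = findCheatCount_alt posX posY minTime dp M N
instance (posX : Int) (posY : Int) (minTime : Int) (dp : List (Int × Int × Int)) (M : Int) (N : Int) (out : Int) : Decidable (Spec_findCheatCount posX posY minTime dp M N out) := by unfold Spec_findCheatCount; infer_instance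

-- ===== CLAIM (what is proved, stated in full; the proofs are below) =====
def Claim_equal_findCheatCount : Prop := ∀ (posX : Int) (posY : Int) (minTime : Int) (dp : List (Int × Int × Int)) (M : Int) (N : Int), Dom_findCheatCount posX posY minTime dp M N → Pre_findCheatCount posX posY minTime dp M N → Spec_findCheatCount posX posY minTime dp M N (findCheatCount posX posY minTime dp M N)

-- ===== LEMMAS AND PROOFS =====

-- the common success test, with the value v of the scanned key explicit
def pvC (posX posY minTime M N base x y v : Int) : Bool :=
  decide (0 ≤ x ∧ x < M ∧ 0 ≤ y ∧ y < N ∧ minTime - (v + |posX - x| + |posY - y| + (minTime - base)) ≥ 100)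

-- A's per-coordinate test (false for coordinates not in the dict)
def pvF (d : PySem.Dict (Int × Int) Int) (posX posY minTime M N base x y : Int) : Bool :=
  (d.get? (x, y)).elim false (pvC posX posY minTime M N base x y)

lemma pv_countP_update {α : Type} [DecidableEq α] (k : α) (b : Bool) (P : α → Bool)
    (hP : P k = false) :
    ∀ (g : List α), g.Nodup →
      g.countP (fun p => if p = k then b else P p)
        = g.countP P + (if k ∈ g then (if b then 1 else 0) else 0) := by
  intro g
  induction g with
  | nil => simp
  | cons a t ih =>
    intro hnd
    rcases List.nodup_cons.mp hnd with ⟨hk, hnd'⟩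
    by_cases hak : a = k
    · subst hak
      have h1 : t.countP (fun p => if p = a then b else P p) = t.countP P := by
        apply List.countP_congr
        intro x hx
        have hxa : x ≠ a := fun h => hk (h ▸ hx)
        simp [hxa]
      simp only [List.countP_cons, h1, hP, List.mem_cons, true_or, if_true]
      cases b <;> simp
    · have ih' := ih hnd'
      simp only [List.countP_cons, ih', List.mem_cons]
      have hka : ¬ (k = a) := fun h => hak h.symm
      simp only [hak, if_false, hka, false_or]
      split_ifs <;> omega

lemma pv_countP_lookup {α : Type} [DecidableEq α] [BEq α] [LawfulBEq α]
    (c : α → Int → Bool) :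
    ∀ (l : List (α × Int)), (l.map Prod.fst).Nodup → ∀ (g : List α), g.Nodup →
      g.countP (fun p => ((PySem.Dict.mk l).get? p).elim false (c p))
        = l.countP (fun e => decide (e.1 ∈ g) && c e.1 e.2) := by
  intro l
  induction l with
  | nil =>
    intro _ g _
    simp [PySem.Dict.get?]
  | cons e t ih =>
    intro hnd g hg
    rw [List.map_cons] at hnd
    rcases List.nodup_cons.mp hnd with ⟨hk, hnd'⟩
    have hnone : (PySem.Dict.mk t).get? e.1 = none := by
      rw [PySem.Dict.get?_eq_none_iff_not_mem_keys]
      simpa [PySem.Dict.keys] using hk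
    have hcongr : g.countP (fun p => ((PySem.Dict.mk (e :: t)).get? p).elim false (c p))
        = g.countP (fun p => if p = e.1 then c e.1 e.2 else ((PySem.Dict.mk t).get? p).elim false (c p)) := by
      apply List.countP_congr
      intro p _
      rw [show (e :: t) = ((e.1, e.2) :: t) by simp, PySem.Dict.get?_mk_cons]
      by_cases h : p = e.1
      · subst h; simp
      · have hb : (e.1 == p) = false := by
          rw [beq_eq_false_iff_ne]
          exact fun hh => h hh.symm
        simp [hb, h]
    rw [hcongr,
      pv_countP_update e.1 (c e.1 e.2) _ (by simp [hnone]) g hg,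
      ih hnd' g hg, List.countP_cons]
    by_cases hmem : e.1 ∈ g <;> simp only [hmem, if_true, if_false, decide_true, decide_false,
      Bool.true_and, Bool.false_and] <;> cases hc : c e.1 e.2 <;> simp

lemma pv_countP_flatMap {α β : Type} (f : α → List β) (p : β → Bool) :
    ∀ (l : List α), ((l.flatMap f).countP p : Int) = (l.map (fun x => ((f x).countP p : Int))).sum := by
  intro l
  induction l with
  | nil => simp
  | cons a t ih =>
    simp only [List.flatMap_cons, List.countP_append, List.map_cons, List.sum_cons, ← ih]
    push_cast
    ring

-- the diamond grid A enumerates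
def pvGrid (posX posY : Int) : List (Int × Int) :=
  (PySem.List.pyRange (posX - 20) (posX + 21) 1).flatMap (fun x =>
    (PySem.List.pyRange (posY - 20 + |posX - x|) (posY + 21 - |posX - x|) 1).map (fun y => (x, y)))

lemma pv_nodup_grid (posX posY : Int) : (pvGrid posX posY).Nodup := by
  unfold pvGrid
  rw [List.nodup_flatMap]
  constructor
  · intro x _
    exact (PySem.List.nodup_pyRange_one _ _).map (fun a b h => by simpa using h)
  · have h := PySem.List.nodup_pyRange_one (posX - 20) (posX + 21)
    refine h.imp ?_
    intro a b hab
    simp only [Function.onFun, List.disjoint_left]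
    rintro ⟨x, y⟩ h1 h2
    simp only [List.mem_map] at h1 h2
    rcases h1 with ⟨_, _, h1⟩
    rcases h2 with ⟨_, _, h2⟩
    rw [Prod.mk.injEq] at h1
    rw [Prod.mk.injEq] at h2
    exact hab (h1.1.trans h2.1.symm)

lemma pv_mem_grid (posX posY a b : Int) :
    (a, b) ∈ pvGrid posX posY ↔ |posX - a| + |posY - b| ≤ 20 := by
  unfold pvGrid
  simp only [List.mem_flatMap, List.mem_map, PySem.List.mem_pyRange_one]
  constructor
  · rintro ⟨x, hx, y, hy, h⟩
    rw [Prod.mk.injEq] at h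
    rw [h.1] at hx
    rw [h.1, h.2] at hy
    rcases abs_cases (posX - a) with ⟨e1, _⟩ | ⟨e1, _⟩ <;>
      rcases abs_cases (posY - b) with ⟨e2, _⟩ | ⟨e2, _⟩ <;> omega
  · intro h
    refine ⟨a, ?_, b, ?_, rfl⟩ <;>
      rcases abs_cases (posX - a) with ⟨e1, _⟩ | ⟨e1, _⟩ <;>
        rcases abs_cases (posY - b) with ⟨e2, _⟩ | ⟨e2, _⟩ <;> omega

-- ===== VERDICT (by name: the statement is the Claim_ definition above) =====
theorem findCheatCount_spec : Claim_equal_findCheatCount := by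
  intro posX posY minTime dp M N _ _
  unfold Spec_findCheatCount findCheatCount findCheatCount_alt
  simp only []
  set d := pvAsDict dp with hd
  set base := d.getD (posX, posY) 0 with hbase
  -- A side: rewrite to a count over the grid
  have hinner : ∀ x count,
      (PySem.List.pyRange (posY - 20 + |posX - x|) (posY + 21 - |posX - x|) 1).foldl
        (fun count y =>
          if 0 ≤ x ∧ x < M ∧ 0 ≤ y ∧ y < N ∧ d.contains (x, y) then
            if minTime - (d.getD (x, y) 0 + |posX - x| + |posY - y| + (minTime - base)) ≥ 100
              then count + 1 else count
          else count) count
      = count + (((PySem.List.pyRange (posY - 20 + |posX - x|) (posY + 21 - |posX - x|) 1).countP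
          (fun y => pvF d posX posY minTime M N base x y) : Nat) : Int) := by
    intro x count
    rw [PySem.List.foldl_congr_mem
      (g := fun count y => if pvF d posX posY minTime M N base x y then count + 1 else count)]
    · exact PySem.List.foldl_if_add_one _ _ _
    · intro acc y _
      unfold pvF pvC
      cases hg : d.get? (x, y) with
      | none =>
        have hcf : d.contains (x, y) = false := by
          rw [PySem.Dict.contains_eq_isSome_get?, hg]; rfl
        simp [hcf]
      | some v =>
        have hcont : d.contains (x, y) = true := by
          rw [PySem.Dict.contains_eq_isSome_get?, hg]; rfl
        have hgd : d.getD (x, y) 0 = v := PySem.Dict.getD_of_get?_eq_some _ 0 hg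
        simp only [hcont, hgd, Option.elim, decide_eq_true_eq]
        split_ifs <;> first | rfl | (exfalso; tauto)
  rw [PySem.List.foldl_congr_mem _ _
    (fun count x => count + (((PySem.List.pyRange (posY - 20 + |posX - x|) (posY + 21 - |posX - x|) 1).countP
        (fun y => pvF d posX posY minTime M N base x y) : Nat) : Int))
    _ (fun acc x _ => hinner x acc)]
  rw [PySem.List.foldl_add]
  -- B side: the filter's length is a countP
  rw [← List.countP_eq_length_filter]
  -- connect the two counts through the grid
  have hgrid : ((pvGrid posX posY).countP
        (fun p => pvF d posX posY minTime M N base p.1 p.2) : Int)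
      = ((PySem.List.pyRange (posX - 20) (posX + 21) 1).map
        (fun x => (((PySem.List.pyRange (posY - 20 + |posX - x|) (posY + 21 - |posX - x|) 1).countP
          (fun y => pvF d posX posY minTime M N base x y) : Nat) : Int))).sum := by
    unfold pvGrid
    rw [pv_countP_flatMap]
    congr 1
    apply List.map_congr_left
    intro x _
    rw [List.countP_map]
    rfl
  have hdmk : d = PySem.Dict.mk d.items := by
    apply PySem.Dict.ext; rfl
  have hkeys : (d.items.map Prod.fst).Nodup := by
    have hh := PySem.Dict.nodup_keys_ofList (dp.map (fun e => ((e.1, e.2.1), e.2.2)))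
    simpa [PySem.Dict.keys, hd, pvAsDict] using hh
  have h1 : (pvGrid posX posY).countP (fun p => pvF d posX posY minTime M N base p.1 p.2)
      = d.items.countP (fun e => decide (e.1 ∈ pvGrid posX posY) && pvC posX posY minTime M N base e.1.1 e.1.2 e.2) := by
    have hh := pv_countP_lookup (α := Int × Int)
      (fun p v => pvC posX posY minTime M N base p.1 p.2 v) d.items hkeys
      (pvGrid posX posY) (pv_nodup_grid posX posY)
    rw [← hdmk] at hh
    exact hh
  have h2 : d.items.countP (fun e => decide (e.1 ∈ pvGrid posX posY) && pvC posX posY minTime M N base e.1.1 e.1.2 e.2)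
      = d.items.countP (fun e => decide (|posX - e.1.1| + |posY - e.1.2| ≤ 20 ∧ 0 ≤ e.1.1 ∧ e.1.1 < M ∧
          0 ≤ e.1.2 ∧ e.1.2 < N ∧ base - e.2 - (|posX - e.1.1| + |posY - e.1.2|) ≥ 100)) := by
    apply List.countP_congr
    intro e _
    have hm := pv_mem_grid posX posY e.1.1 e.1.2
    have he : e.1 = (e.1.1, e.1.2) := rfl
    unfold pvC
    by_cases hg : (e.1.1, e.1.2) ∈ pvGrid posX posY
    · have hd20 : |posX - e.1.1| + |posY - e.1.2| ≤ 20 := hm.mp hg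
      have hmem : e.1 ∈ pvGrid posX posY := by rw [he]; exact hg
      simp only [hmem, decide_true, Bool.true_and, decide_eq_true_eq]
      constructor
      · rintro ⟨a1, a2, a3, a4, a5⟩
        refine ⟨hd20, a1, a2, a3, a4, ?_⟩
        linarith
      · rintro ⟨_, a1, a2, a3, a4, a5⟩
        refine ⟨a1, a2, a3, a4, ?_⟩
        linarith
    · have hd20 : ¬ (|posX - e.1.1| + |posY - e.1.2| ≤ 20) := fun h => hg (hm.mpr h)
      have hmem : ¬ (e.1 ∈ pvGrid posX posY) := by rw [he]; exact hg
      simp [hmem, hd20]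
  rw [← hgrid, h1, h2]
  ring
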